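-- pv_equiv track=rewrite | github.com/raeez/chiral-bar-cobar | compute/lib/bar_cohomology_w3_explicit_engine.py | w3_bar_dims
-- ===== SOURCE A (Python) =====
-- from typing import Dict, List, Optional, Tuple
--
-- def w3_bar_dims(max_n: int = 20) -> List[int]:
--     """Bar cohomology dimensions a_n = dim H^1(B(W_3))_n.
--
--     Sequence: 2, 5, 16, 52, 171, 564, 1862, 6149, ...
--     Recurrence: a_n = 4*a_{n-1} - 2*a_{n-2} - a_{n-3} for n >= 4.
--     Initial: a_1 = 2, a_2 = 5, a_3 = 16.
--
--     The generating function is P(x) = x(2-3x) / ((1-x)(1-3x-x^2))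
--     (conj:w3-bar-gf in landscape_census.tex).
--     """
--     a = [0] * (max_n + 1)
--     if max_n >= 1:
--         a[1] = 2
--     if max_n >= 2:
--         a[2] = 5
--     if max_n >= 3:
--         a[3] = 16
--     for n in range(4, max_n + 1):
--         a[n] = 4 * a[n - 1] - 2 * a[n - 2] - a[n - 3]
--     return a
-- ===== SOURCE B (Python) =====
-- from typing import Dict, List, Optional, Tuple
--
-- def w3_bar_dims(max_n: int = 20) -> List[int]:
--     """Same sequence via the generating-function factorization
--     x(2-3x) / ((1-x)(1-3x-x^2)): stream the order-2 auxiliary sequence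
--     b_0=1, b_1=3, b_k = 3*b_{k-1} + b_{k-2} together with its running
--     prefix sum, and emit a_n = 2*b_{n-1} - (b_0 + ... + b_{n-2})."""
--     if max_n < 0:
--         return []
--     out = [0]
--     u, v = 1, 3   # b_{n-1}, b_n
--     s = 0         # d_{n-2} = b_0 + ... + b_{n-2}
--     for n in range(1, max_n + 1):
--         out.append(2 * u - s)   # a_n = 2*b_{n-1} - d_{n-2}
--         s += u
--         u, v = v, 3 * v + u
--     return out
-- ===== Notes on version B (the rewrite author's own statement) =====
-- stated objective: alternative
-- what changed: Instead of preallocating a zero list and filling it in place via the order-3 recurrence a_n = 4a_{n-1} - 2a_{n-2} - a_{n-3} read back from the list, B streams the order-2 auxiliary sequence b_k = 3b_{k-1} + b_{k-2} of the generating-function factor 1/(1-3x-x^2) together with its running prefix sum in scalar state, appending a_n = 2*b_{n-1} - sum(b_0..b_{n-2}); it never reads the output list.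
import Mathlib
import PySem

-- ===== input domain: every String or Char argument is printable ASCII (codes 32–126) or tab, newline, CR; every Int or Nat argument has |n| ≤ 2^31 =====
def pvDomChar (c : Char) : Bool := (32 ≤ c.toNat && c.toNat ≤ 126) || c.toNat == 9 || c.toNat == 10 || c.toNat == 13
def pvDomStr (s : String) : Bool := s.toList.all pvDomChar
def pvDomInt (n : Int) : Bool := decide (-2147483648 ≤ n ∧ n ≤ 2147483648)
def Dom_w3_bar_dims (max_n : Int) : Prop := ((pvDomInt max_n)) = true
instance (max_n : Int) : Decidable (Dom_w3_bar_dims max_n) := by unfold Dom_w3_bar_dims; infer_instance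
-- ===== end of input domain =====

-- B streams the order-2 auxiliary sequence of the generating-function factorization
-- x(2-3x)/((1-x)(1-3x-x^2)) with its running prefix sum instead of A's in-place order-3
-- array fill; objective: alternative algorithm, same O(n) cost.

-- ===== PORT A =====
def w3_bar_dims (max_n : Int) : List Int :=
  let a := List.replicate (max_n + 1).toNat 0
  let a := if max_n ≥ 1 then a.set 1 2 else a
  let a := if max_n ≥ 2 then a.set 2 5 else a
  let a := if max_n ≥ 3 then a.set 3 16 else a
  (PySem.List.pyRange 4 (max_n + 1) 1).foldl
    (fun l n => l.set n.toNat
      (4 * PySem.List.pyGetD l (n - 1) 0 - 2 * PySem.List.pyGetD l (n - 2) 0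
        - PySem.List.pyGetD l (n - 3) 0)) a

-- ===== PORT B =====
def w3_bar_dims_alt (max_n : Int) : List Int :=
  if max_n < 0 then []
  else
    -- state (out, u, v, s): u = b_{n-1}, v = b_n of b_k = 3*b_{k-1} + b_{k-2} (b_0=1, b_1=3),
    -- s = b_0 + ... + b_{n-2}; per iteration append a_n = 2*u - s, then s += u; u, v = v, 3*v + u
    ((PySem.List.pyRange 1 (max_n + 1) 1).foldl
      (fun (st : List Int × Int × Int × Int) _n =>
        (st.1 ++ [2 * st.2.1 - st.2.2.2], st.2.2.1, 3 * st.2.2.1 + st.2.1, st.2.2.2 + st.2.1))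
      ([0], 1, 3, 0)).1

-- ===== PRECONDITION & SPEC =====
def Spec_w3_bar_dims (max_n : Int) (out : List Int) : Prop := out = w3_bar_dims_alt max_n
instance (max_n : Int) (out : List Int) : Decidable (Spec_w3_bar_dims max_n out) := by unfold Spec_w3_bar_dims; infer_instance

-- ===== CLAIM (what is proved, stated in full; the proofs are below) =====
def Claim_equal_w3_bar_dims : Prop := ∀ (max_n : Int), Dom_w3_bar_dims max_n → Spec_w3_bar_dims max_n (w3_bar_dims max_n)

-- ===== LEMMAS AND PROOFS =====

-- the canonical sequence A computes
def fA : Nat → Int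
  | 0 => 0
  | 1 => 2
  | 2 => 5
  | 3 => 16
  | (n+4) => 4 * fA (n+3) - 2 * fA (n+2) - fA (n+1)

-- B's auxiliary order-2 sequence and the partial sums of its first j terms
def bf : Nat → Int
  | 0 => 1
  | 1 => 3
  | (n+2) => 3 * bf (n+1) + bf n

def dS : Nat → Int
  | 0 => 0
  | (j+1) => dS j + bf j

-- the sequence B computes
def gB : Nat → Int
  | 0 => 0
  | 1 => 2 * dS 1
  | (n+2) => 2 * dS (n+2) - 3 * dS (n+1)

theorem dS_rec (n : Nat) :
    dS (n+4) = 4 * dS (n+3) - 2 * dS (n+2) - dS (n+1) := by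
  have h4 : dS (n+4) = dS (n+3) + bf (n+3) := rfl
  have h3 : dS (n+3) = dS (n+2) + bf (n+2) := rfl
  have h2 : dS (n+2) = dS (n+1) + bf (n+1) := rfl
  have hb : bf (n+3) = 3 * bf (n+2) + bf (n+1) := rfl
  omega

theorem gB_rec (n : Nat) :
    gB (n+5) = 4 * gB (n+4) - 2 * gB (n+3) - gB (n+2) := by
  have g5 : gB (n+5) = 2 * dS (n+5) - 3 * dS (n+4) := rfl
  have g4 : gB (n+4) = 2 * dS (n+4) - 3 * dS (n+3) := rfl
  have g3 : gB (n+3) = 2 * dS (n+3) - 3 * dS (n+2) := rfl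
  have g2 : gB (n+2) = 2 * dS (n+2) - 3 * dS (n+1) := rfl
  have d1 : dS (n+5) = 4 * dS (n+4) - 2 * dS (n+3) - dS (n+2) := dS_rec (n+1)
  have d0 : dS (n+4) = 4 * dS (n+3) - 2 * dS (n+2) - dS (n+1) := dS_rec n
  omega

theorem fA_eq_gB_aux : ∀ n, fA (n+1) = gB (n+1) ∧ fA (n+2) = gB (n+2) ∧
    fA (n+3) = gB (n+3) ∧ fA (n+4) = gB (n+4) := by
  intro n
  induction n with
  | zero => refine ⟨by decide, by decide, by decide, by decide⟩
  | succ m ih =>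
    obtain ⟨h1, h2, h3, h4⟩ := ih
    refine ⟨h2, h3, h4, ?_⟩
    have hf : fA (m+5) = 4 * fA (m+4) - 2 * fA (m+3) - fA (m+2) := rfl
    rw [hf, h4, h3, h2, gB_rec m]

theorem fA_eq_gB : ∀ n, fA n = gB n := by
  intro n
  match n with
  | 0 => decide
  | (m+1) => exact (fA_eq_gB_aux m).1


-- "already filled below k" view of A's array
def pA (k i : Nat) : Int := if i < k then fA i else 0

theorem fA_rec' (k : Nat) (hk : 4 ≤ k) :
    fA k = 4 * fA (k-1) - 2 * fA (k-2) - fA (k-3) := by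
  obtain ⟨t, rfl⟩ : ∃ t, k = t + 4 := ⟨k - 4, by omega⟩
  rfl

theorem set_map_range (h : Nat → Int) (m k : Nat) (v : Int) :
    ((List.range m).map h).set k v
      = (List.range m).map (fun i => if i = k then v else h i) := by
  apply List.ext_getElem
  · simp
  · intro i h1 h2
    simp only [List.getElem_set, List.getElem_map, List.getElem_range]
    simp at h1
    split_ifs with hik hik2 hik3 <;> omega

theorem getD_map_range' (h : Nat → Int) (m k : Nat) (hk : k < m) :
    ((List.range m).map h).getD k 0 = h k := by
  rw [List.getD_eq_getElem?_getD]
  simp [hk]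

theorem A_loop : ∀ (c k m : Nat), 4 ≤ k → k + c = m →
    (PySem.List.pyRange (k:Int) (m:Int) 1).foldl
      (fun l n => l.set n.toNat
        (4 * PySem.List.pyGetD l (n - 1) 0 - 2 * PySem.List.pyGetD l (n - 2) 0
          - PySem.List.pyGetD l (n - 3) 0)) ((List.range m).map (pA k))
      = (List.range m).map (pA m) := by
  intro c
  induction c with
  | zero =>
    intro k m hk hkm
    obtain rfl : k = m := by omega
    rw [PySem.List.pyRange_one_eq_nil (le_refl _)]
    simp
  | succ c ih =>
    intro k m hk hkm
    have hkm' : (k : Int) < (m : Int) := by exact_mod_cast (by omega : k < m)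
    rw [PySem.List.pyRange_one_cons hkm', List.foldl_cons]
    have e1 : ((k:Int) - 1) = (((k-1 : Nat)) : Int) := by omega
    have e2 : ((k:Int) - 2) = (((k-2 : Nat)) : Int) := by omega
    have e3 : ((k:Int) - 3) = (((k-3 : Nat)) : Int) := by omega
    rw [e1, e2, e3]
    rw [PySem.List.pyGetD_natCast, PySem.List.pyGetD_natCast, PySem.List.pyGetD_natCast]
    rw [getD_map_range' _ _ _ (by omega), getD_map_range' _ _ _ (by omega),
        getD_map_range' _ _ _ (by omega)]
    have hpa1 : pA k (k-1) = fA (k-1) := by simp [pA]; omega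
    have hpa2 : pA k (k-2) = fA (k-2) := by simp [pA]; omega
    have hpa3 : pA k (k-3) = fA (k-3) := by simp [pA]; omega
    rw [hpa1, hpa2, hpa3, ← fA_rec' k hk]
    have htn : ((k:Int)).toNat = k := Int.toNat_natCast k
    rw [htn, set_map_range]
    have hmap : (List.range m).map (fun i => if i = k then fA k else pA k i)
        = (List.range m).map (pA (k+1)) := by
      apply List.map_congr_left
      intro i hi
      simp only [pA]
      split_ifs <;> (try subst_eqs) <;> first | rfl | omega
    rw [hmap]
    have hc : ((k:Int)) + 1 = (((k+1 : Nat)) : Int) := by push_cast; ring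
    rw [hc]
    exact ih (k+1) m (by omega) (by omega)

theorem A_eq_map (max_n : Int) :
    w3_bar_dims max_n = (List.range (max_n + 1).toNat).map fA := by
  by_cases hneg : max_n < 0
  · have hm : (max_n + 1).toNat = 0 := by omega
    unfold w3_bar_dims
    dsimp only
    rw [hm]
    rw [if_neg (by omega), if_neg (by omega), if_neg (by omega)]
    rw [PySem.List.pyRange_one_eq_nil (by omega)]
    simp
  · by_cases hsm : max_n < 3
    · have h3 : max_n = 0 ∨ max_n = 1 ∨ max_n = 2 := by omega
      rcases h3 with rfl | rfl | rfl <;> decide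
    · rw [not_lt] at hneg hsm
      set m := (max_n + 1).toNat with hmdef
      have hm4 : 4 ≤ m := by omega
      have hmc : ((m : Nat) : Int) = max_n + 1 := by omega
      unfold w3_bar_dims
      dsimp only
      rw [if_pos (by omega), if_pos (by omega), if_pos (by omega)]
      have hinit : ((List.replicate m (0:Int)).set 1 2 |>.set 2 5 |>.set 3 16)
          = (List.range m).map (pA 4) := by
        apply List.ext_getElem
        · simp
        · intro i h1 h2
          simp only [List.getElem_set, List.getElem_map, List.getElem_range,
            List.getElem_replicate, pA]
          split_ifs
          all_goals try omega
          all_goals subst_eqs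
          all_goals try decide
          obtain rfl : i = 0 := by omega
          decide
      rw [← hmdef, hinit]
      have h4 : (4 : Int) = ((4 : Nat) : Int) := by norm_num
      rw [← hmc, h4]
      exact (A_loop (m - 4) 4 m (by omega) (by omega)).trans
        (by apply List.map_congr_left; intro i hi; simp only [pA]; rw [if_pos (by simpa using hi)])


theorem bf_rec' (L : Nat) (hL : 2 ≤ L) : bf L = 3 * bf (L-1) + bf (L-2) := by
  obtain ⟨t, rfl⟩ : ∃ t, L = t + 2 := ⟨L - 2, by omega⟩
  rfl

theorem dS_succ' (k : Nat) (hk : 1 ≤ k) : dS k = dS (k-1) + bf (k-1) := by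
  obtain ⟨t, rfl⟩ : ∃ t, k = t + 1 := ⟨k - 1, by omega⟩
  rfl

theorem gB_is (k : Nat) (hk : 2 ≤ k) : gB k = 2 * dS k - 3 * dS (k-1) := by
  obtain ⟨t, rfl⟩ : ∃ t, k = t + 2 := ⟨k - 2, by omega⟩
  rfl

theorem gB_is2 (k : Nat) (hk : 1 ≤ k) : gB k = 2 * bf (k-1) - dS (k-1) := by
  by_cases hk2 : 2 ≤ k
  · have h1 := gB_is k hk2
    have h2 := dS_succ' k hk
    omega
  · obtain rfl : k = 1 := by omega
    decide

theorem B_loop (max_n : Int) : ∀ (c k : Nat), 1 ≤ k → (k : Int) + c = max_n + 1 →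
    (PySem.List.pyRange (k:Int) (max_n+1) 1).foldl
        (fun (st : List Int × Int × Int × Int) _n =>
          (st.1 ++ [2 * st.2.1 - st.2.2.2], st.2.2.1, 3 * st.2.2.1 + st.2.1, st.2.2.2 + st.2.1))
        ((List.range k).map gB, bf (k-1), bf k, dS (k-1))
      = ((List.range (k+c)).map gB, bf (k+c-1), bf (k+c), dS (k+c-1)) := by
  intro c
  induction c with
  | zero =>
    intro k hk hkc
    rw [PySem.List.pyRange_one_eq_nil (by omega)]
    simp
  | succ c ih =>
    intro k hk hkc
    rw [PySem.List.pyRange_one_cons (by omega), List.foldl_cons]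
    dsimp only
    have hval : 2 * bf (k-1) - dS (k-1) = gB k := (gB_is2 k hk).symm
    have happ : (List.range k).map gB ++ [gB k] = (List.range (k+1)).map gB := by
      rw [List.range_succ, List.map_append]; rfl
    have hv : 3 * bf k + bf (k-1) = bf (k+1) := by
      have h2 : k + 1 - 2 = k - 1 := by omega
      rw [bf_rec' (k+1) (by omega), Nat.add_sub_cancel, h2]
    rw [hval, happ, hv, ← dS_succ' k hk]
    have hc : ((k:Int)) + 1 = (((k+1 : Nat)) : Int) := by omega
    have IH := ih (k+1) (by omega) (by omega)
    simp only [Nat.add_sub_cancel] at IH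
    rw [hc, IH]
    have he : k + 1 + c = k + (c+1) := by omega
    rw [he]

theorem B_eq_map (max_n : Int) :
    w3_bar_dims_alt max_n = (List.range (max_n + 1).toNat).map gB := by
  by_cases hneg : max_n < 0
  · unfold w3_bar_dims_alt
    rw [if_pos hneg]
    have hm : (max_n + 1).toNat = 0 := by omega
    rw [hm]
    simp
  · unfold w3_bar_dims_alt
    rw [if_neg hneg]
    have hinit : (([0], 1, 3, 0) : List Int × Int × Int × Int)
        = ((List.range 1).map gB, bf (1-1), bf 1, dS (1-1)) := by decide
    rw [hinit]
    have hL := B_loop max_n max_n.toNat 1 (le_refl 1) (by omega)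
    rw [Nat.cast_one] at hL
    rw [hL]
    have he : 1 + max_n.toNat = (max_n + 1).toNat := by omega
    rw [he]

-- ===== VERDICT (by name: the statement is the Claim_ definition above) =====
theorem w3_bar_dims_spec : Claim_equal_w3_bar_dims := by
  intro max_n _
  unfold Spec_w3_bar_dims
  rw [A_eq_map, B_eq_map]
  exact List.map_congr_left (fun i _ => fA_eq_gB i)
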